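-- pv_equiv track=rewrite | github.com/goreatharva/Competitive-Programming- | Codes/CodeChef_Starters116_Div4/Hattrick.py | check_hat_trick
-- ===== SOURCE A (Python) =====
-- def check_hat_trick(scores):
--     wicket_cnt = 0
--     for score in scores:
--         if score == "W":
--             wicket_cnt += 1
--         else:
--             wicket_cnt = 0
--         if wicket_cnt == 3:
--             return "YES"
--     return "NO"
-- ===== SOURCE B (Python) =====
-- from itertools import groupby
--
-- def check_hat_trick(scores):
--     for key, group in groupby(scores):
--         if key == "W" and sum(1 for _ in group) >= 3:
--             return "YES"
--     return "NO"
-- ===== Notes on version B (the rewrite author's own statement) =====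
-- stated objective: idiomatic
-- what changed: Replaced the reset-on-mismatch wicket counter with itertools.groupby: iterate over runs of consecutive equal elements and answer YES when a 'W'-run has length >= 3.
import Mathlib
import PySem

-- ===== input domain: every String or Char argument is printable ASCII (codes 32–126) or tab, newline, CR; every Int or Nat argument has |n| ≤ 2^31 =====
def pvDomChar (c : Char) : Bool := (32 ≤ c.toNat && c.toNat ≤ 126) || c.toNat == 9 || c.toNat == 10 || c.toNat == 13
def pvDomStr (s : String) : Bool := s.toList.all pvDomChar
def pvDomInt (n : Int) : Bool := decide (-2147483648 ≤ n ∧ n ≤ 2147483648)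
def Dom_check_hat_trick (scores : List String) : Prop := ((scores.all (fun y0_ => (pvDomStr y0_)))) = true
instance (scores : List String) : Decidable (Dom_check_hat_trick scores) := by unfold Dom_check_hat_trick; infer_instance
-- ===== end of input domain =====

-- B replaces A's reset-on-mismatch wicket counter by a scan over runs of consecutive
-- equal elements (itertools.groupby), answering YES when a "W"-run has length ≥ 3.


-- ===== PORT A =====
-- the for-loop with its reset-on-mismatch counter and early return
def hatLoop (wicket_cnt : Int) : List String → String
  | [] => "NO"
  | score :: rest =>
    let c : Int := if score = "W" then wicket_cnt + 1 else 0
    if c = 3 then "YES" else hatLoop c rest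

def check_hat_trick (scores : List String) : String := hatLoop 0 scores

-- ===== PORT B =====
-- groupby: each step peels one maximal run (key :: takeWhile (== key)) off the front
def check_hat_trick_alt : List String → String
  | [] => "NO"
  | key :: rest =>
    if key = "W" ∧ 1 + (rest.takeWhile (· == key)).length ≥ 3 then "YES"
    else check_hat_trick_alt (rest.dropWhile (· == key))
termination_by l => l.length
decreasing_by
  have := List.length_dropWhile_le (· == key) rest
  simp only [List.length_cons]; omega

-- ===== PRECONDITION & SPEC =====
def Spec_check_hat_trick (scores : List String) (out : String) : Prop := out = check_hat_trick_alt scores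
instance (scores : List String) (out : String) : Decidable (Spec_check_hat_trick scores out) := by unfold Spec_check_hat_trick; infer_instance

-- ===== CLAIM (what is proved, stated in full; the proofs are below) =====
def Claim_equal_check_hat_trick : Prop := ∀ (scores : List String), Dom_check_hat_trick scores → Spec_check_hat_trick scores (check_hat_trick scores)

-- ===== LEMMAS AND PROOFS =====

-- a non-"W" element resets the counter: the incoming count is irrelevant
lemma hatLoop_skip (d : String) (hd : d ≠ "W") (c : Int) (r : List String) :
    hatLoop c (d :: r) = hatLoop 0 r := by
  simp [hatLoop, hd]

-- a prefix containing no "W" is irrelevant when starting from count 0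
lemma hatLoop_nonW_prefix : ∀ (p : List String), (∀ e ∈ p, e ≠ "W") →
    ∀ r, hatLoop 0 (p ++ r) = hatLoop 0 r := by
  intro p
  induction p with
  | nil => intro _ r; rfl
  | cons x t ih =>
    intro h r
    rw [List.cons_append, hatLoop_skip x (h x (by simp)) 0 (t ++ r)]
    exact ih (fun e he => h e (by simp [he])) r

-- starting from count ≤ 1 with a non-"W" head is the same as count 0
lemma hatLoop_head_nonW (c : Int) : ∀ (xs : List String),
    (∀ d, xs.head? = some d → d ≠ "W") → hatLoop c xs = hatLoop 0 xs := by
  intro xs h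
  cases xs with
  | nil => rfl
  | cons d r =>
    have hd : d ≠ "W" := h d rfl
    rw [hatLoop_skip d hd c r, hatLoop_skip d hd 0 r]

lemma main_lemma : ∀ (n : ℕ) (xs : List String), xs.length ≤ n →
    hatLoop 0 xs = check_hat_trick_alt xs := by
  intro n
  induction n with
  | zero =>
    intro xs h
    have : xs = [] := List.eq_nil_of_length_eq_zero (Nat.le_zero.mp h)
    subst this; rw [check_hat_trick_alt]; rfl
  | succ n ih =>
    intro xs hlen
    cases xs with
    | nil => rw [check_hat_trick_alt]; rfl
    | cons key rest =>
      have htd := List.takeWhile_append_dropWhile (p := (· == key)) (l := rest)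
      have hdrople := List.length_dropWhile_le (· == key) rest
      have hrest : rest.length ≤ n := by simpa using Nat.lt_succ_iff.mp (Nat.lt_of_lt_of_le (by simp) hlen)
      by_cases hk : key = "W"
      · subst hk
        -- split on the run length
        rcases htw : rest.takeWhile (· == "W") with _ | ⟨w1, tw⟩
        · -- run length 1: next element (if any) is not "W"
          have hdrop : rest.dropWhile (· == "W") = rest := by
            conv_rhs => rw [← htd, htw]
            simp
          rw [show check_hat_trick_alt ("W" :: rest)
              = check_hat_trick_alt (rest.dropWhile (· == "W")) by
            rw [check_hat_trick_alt]; simp [htw]]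
          rw [hdrop]
          have hhead : ∀ d, rest.head? = some d → d ≠ "W" := by
            intro d hd
            cases rest with
            | nil => simp at hd
            | cons a b =>
              simp at hd; subst hd
              intro hW; subst hW
              simp [List.takeWhile] at htw
          rw [show hatLoop 0 ("W" :: rest) = hatLoop 1 rest by simp [hatLoop]]
          rw [hatLoop_head_nonW 1 rest hhead]
          exact ih rest hrest
        · have hw1 : w1 = "W" := by
            have hmem : w1 ∈ rest.takeWhile (· == "W") := by rw [htw]; simp
            have := List.mem_takeWhile_imp hmem
            simpa [beq_iff_eq] using this
          subst hw1
          rcases htw2 : tw with _ | ⟨w2, tw2⟩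
          · -- run length 2: after W W, next element (if any) not "W"
            subst htw2
            have hrest_shape : ∃ r2, rest = "W" :: r2 ∧ r2.takeWhile (· == "W") = [] := by
              cases rest with
              | nil => simp at htw
              | cons a b =>
                by_cases ha : a = "W"
                · subst ha
                  refine ⟨b, rfl, ?_⟩
                  simpa [List.takeWhile] using htw
                · simp only [List.takeWhile_cons, beq_iff_eq, if_neg ha] at htw
                  exact absurd htw (by simp)
            obtain ⟨r2, hr2, hr2tw⟩ := hrest_shape
            subst hr2
            have hdrop : ("W" :: r2).dropWhile (· == "W") = r2.dropWhile (· == "W") := by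
              simp [List.dropWhile]
            have hdrop2 : r2.dropWhile (· == "W") = r2 := by
              have := List.takeWhile_append_dropWhile (p := (· == "W")) (l := r2)
              rw [hr2tw, List.nil_append] at this; exact this
            rw [show check_hat_trick_alt ("W" :: "W" :: r2)
                = check_hat_trick_alt r2 by
              rw [check_hat_trick_alt]; simp [htw, hdrop, hdrop2]]
            have hhead : ∀ d, r2.head? = some d → d ≠ "W" := by
              intro d hd
              cases r2 with
              | nil => simp at hd
              | cons a b =>
                simp at hd; subst hd
                intro hW; subst hW
                simp [List.takeWhile] at hr2tw
            rw [show hatLoop 0 ("W" :: "W" :: r2) = hatLoop 2 r2 by simp [hatLoop]]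
            rw [hatLoop_head_nonW 2 r2 hhead]
            have hr2len : r2.length ≤ n := by simp at hlen ⊢; omega
            exact ih r2 hr2len
          · -- run length ≥ 3: A finds W W W immediately
            have hw2 : w2 = "W" := by
              have : w2 ∈ rest.takeWhile (· == "W") := by rw [htw, htw2]; simp
              have := List.mem_takeWhile_imp this
              simpa [beq_iff_eq] using this
            subst hw2
            have hpre : rest.takeWhile (· == "W") <+: rest := List.takeWhile_prefix _
            rw [htw, htw2] at hpre
            obtain ⟨t, ht⟩ := hpre
            rw [show check_hat_trick_alt ("W" :: rest) = "YES" by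
              rw [check_hat_trick_alt]; simp [htw, htw2]
              intro h; exact absurd h (by omega)]
            rw [← ht]
            simp [hatLoop]
      · -- key ≠ "W": the whole run is non-"W"; both sides skip it
        rw [show check_hat_trick_alt (key :: rest)
            = check_hat_trick_alt (rest.dropWhile (· == key)) by
          rw [check_hat_trick_alt]; simp [hk]]
        have hnonW : ∀ e ∈ rest.takeWhile (· == key), e ≠ "W" := by
          intro e he
          have := List.mem_takeWhile_imp he
          simp [beq_iff_eq] at this
          subst this; exact hk
        have h1 : hatLoop 0 rest = hatLoop 0 (rest.dropWhile (· == key)) := by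
          conv_lhs => rw [← htd]
          exact hatLoop_nonW_prefix _ hnonW _
        rw [hatLoop_skip key hk 0 rest, h1]
        exact ih _ (le_trans hdrople hrest)

-- ===== VERDICT (by name: the statement is the Claim_ definition above) =====
theorem check_hat_trick_spec : Claim_equal_check_hat_trick := by
  intro scores _
  unfold Spec_check_hat_trick check_hat_trick
  exact main_lemma scores.length scores le_rfl
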